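-- pv_equiv track=rewrite | github.com/igrechuhin/Cortex | src/cortex/analysis/structure_analyzer.py | _calculate_dependency_depths
-- ===== SOURCE A (Python) =====
-- def _calculate_dependency_depths(
--     graph: dict[str, dict[str, list[str]]]
-- ) -> tuple[dict[str, int], int]:
--     """Calculate dependency depths for all files.
--
--     Args:
--         graph: Dependency graph
--
--     Returns:
--         Tuple of (depth_map, max_depth)
--     """
--     max_depth = 0
--     depth_map: dict[str, int] = {}
--
--     def calculate_depth(file_name: str, visited: set[str]) -> int:
--         """Calculate maximum dependency depth for a file."""
--         if file_name in depth_map: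
--             return depth_map[file_name]
--
--         if file_name in visited:
--             return 0  # Circular dependency
--
--         visited.add(file_name)
--
--         dependencies = graph.get(file_name, {}).get("dependencies", [])
--         if not dependencies:
--             depth = 0
--         else:
--             depth = 1 + max(
--                 calculate_depth(dep, visited.copy()) for dep in dependencies
--             )
--
--         depth_map[file_name] = depth
--         return depth
--
--     for file_name in graph.keys():
--         depth = calculate_depth(file_name, set())
--         max_depth = max(max_depth, depth)
--
--     return depth_map, max_depth
-- ===== SOURCE B (Python) =====
-- def _calculate_dependency_depths(
--     graph: dict[str, dict[str, list[str]]]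
-- ) -> tuple[dict[str, int], int]:
--     """Iterative post-order DFS over an explicit frame stack (no recursion, no set copies)."""
--     depth_map: dict[str, int] = {}
--     on_path: set[str] = set()
--     for root in graph:
--         if root in depth_map:
--             continue
--         on_path.add(root)
--         stack = [[root, graph.get(root, {}).get("dependencies", []), 0, 0]]
--         while stack:
--             frame = stack[-1]
--             name, deps, i, best = frame
--             if i < len(deps):
--                 frame[2] = i + 1
--                 child = deps[i]
--                 if child in depth_map:
--                     frame[3] = max(best, depth_map[child])
--                 elif child not in on_path:
--                     on_path.add(child)
--                     stack.append([child, graph.get(child, {}).get("dependencies", []), 0, 0])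
--                 # else: child is on the current path -> circular dependency, contributes 0
--             else:
--                 depth = 1 + best if deps else 0
--                 depth_map[name] = depth
--                 on_path.discard(name)
--                 stack.pop()
--                 if stack:
--                     stack[-1][3] = max(stack[-1][3], depth)
--     return depth_map, max(depth_map.values(), default=0)
-- ===== Notes on version B (the rewrite author's own statement) =====
-- stated objective: alternative
-- what changed: replaces the recursive DFS that copies the visited set at every recursive call with an iterative post-order DFS over an explicit frame stack (frame = node, deps, next-index, best child depth) and one shared backtracked on-path set, computing max_depth from depth_map.values() at the end
import Mathlib
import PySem

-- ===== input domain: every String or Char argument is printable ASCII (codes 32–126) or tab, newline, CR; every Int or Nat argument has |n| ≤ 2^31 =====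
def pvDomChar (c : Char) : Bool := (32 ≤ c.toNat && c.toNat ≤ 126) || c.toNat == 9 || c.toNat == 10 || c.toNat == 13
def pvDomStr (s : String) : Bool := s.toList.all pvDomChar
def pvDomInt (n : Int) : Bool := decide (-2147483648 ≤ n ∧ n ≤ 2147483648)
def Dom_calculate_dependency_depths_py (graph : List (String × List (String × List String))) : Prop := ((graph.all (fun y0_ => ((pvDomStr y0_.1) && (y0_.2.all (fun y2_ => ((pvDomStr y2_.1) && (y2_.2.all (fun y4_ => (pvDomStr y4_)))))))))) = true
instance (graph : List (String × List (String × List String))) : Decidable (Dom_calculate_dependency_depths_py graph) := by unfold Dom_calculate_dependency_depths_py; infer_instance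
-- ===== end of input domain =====

-- B replaces A's recursive DFS with per-call visited.copy() by an ITERATIVE post-order DFS
-- over an explicit frame stack with one shared backtracked on-path set; the two ports are
-- proved equal on every input.

-- ===== PORT A =====
-- fuel bound shared by both ports (port scaffolding, not Python code): the DFS call path
-- holds pairwise-distinct names, each a graph key or a member of some dependency list,
-- so its length never reaches this bound.
def pvFuel (graph : List (String × List (String × List String))) : Nat :=
  graph.length + (graph.map (fun e => (e.2.map (fun p => p.2.length)).sum)).sum + 1

-- graph.get(file_name, {}).get("dependencies", [])
def pvDepsA (graph : List (String × List (String × List String))) (name : String) : List String :=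
  (PySem.Dict.mk ((PySem.Dict.mk graph).getD name [])).getD "dependencies" []

-- calculate_depth(file_name, visited): memo check, cycle check, 1 + max over children
-- (max(generator) ported as first element then a left fold); visited.copy() is value passing.
def pvCalcDepthA (graph : List (String × List (String × List String))) :
    Nat → String → PySem.Set String → PySem.Dict String Int → Int × PySem.Dict String Int
  | 0, _, _, memo => (0, memo)
  | fuel+1, name, visited, memo =>
    match memo.get? name with
    | some d => (d, memo)
    | none =>
      if PySem.Set.contains visited name then (0, memo)
      else
        let visited' := PySem.Set.add visited name
        match pvDepsA graph name with
        | [] => (0, memo.insert name 0)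
        | d0 :: rest =>
          let r0 := pvCalcDepthA graph fuel d0 visited' memo
          let rf := rest.foldl (fun (s : Int × PySem.Dict String Int) dep =>
              let r := pvCalcDepthA graph fuel dep visited' s.2
              (max s.1 r.1, r.2)) (r0.1, r0.2)
          (1 + rf.1, rf.2.insert name (1 + rf.1))

def calculate_dependency_depths_py (graph : List (String × List (String × List String))) : (List (String × Int)) × Int :=
  let fuel := pvFuel graph
  let r := graph.foldl (fun (s : PySem.Dict String Int × Int) e =>
      let c := pvCalcDepthA graph fuel e.1 PySem.Set.empty s.1
      (c.2, max s.2 c.1)) (PySem.Dict.mk [], 0)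
  (r.1.items, r.2)

-- ===== PORT B =====
-- graph.get(name, {}).get("dependencies", [])
def pvDepsB (graph : List (String × List (String × List String))) (name : String) : List String :=
  (PySem.Dict.mk ((PySem.Dict.mk graph).getD name [])).getD "dependencies" []

-- step-count fuel for the while loop (port scaffolding, not Python code): an upper bound on
-- the number of loop iterations of one root's DFS, proved sufficient in the lemmas below.
def pvStepBound (graph : List (String × List (String × List String))) : Nat → Nat
  | 0 => pvFuel graph + 1
  | f+1 => pvFuel graph * (1 + pvStepBound graph f) + 1

-- stack.pop(); if stack: stack[-1][3] = max(stack[-1][3], depth)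
def pvBump (rest : List (String × List String × Nat × Int × Nat)) (depth : Int) :
    List (String × List String × Nat × Int × Nat) :=
  match rest with
  | [] => []
  | (n, D, i, b, f) :: r => (n, D, i, max b depth, f) :: r

-- the while loop; a frame is (name, deps, i, best, f) where f is fuel scaffolding bounding
-- the remaining push depth exactly as port A's fuel does (a child met at f = 0 contributes
-- 0, which is what pvCalcDepthA 0 returns).
def pvRunB (graph : List (String × List (String × List String))) :
    Nat → List (String × List String × Nat × Int × Nat) →
    PySem.Dict String Int → PySem.Set String → PySem.Dict String Int × PySem.Set String
  | _, [], memo, onp => (memo, onp)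
  | 0, _ :: _, memo, onp => (memo, onp)
  | fuel+1, (name, D, i, best, f) :: rest, memo, onp =>
    match D[i]? with                                 -- if i < len(deps): child = deps[i]
    | some child =>
      match f with
      | 0 => pvRunB graph fuel ((name, D, i+1, best, 0) :: rest) memo onp
      | g+1 =>
        match memo.get? child with                   -- if child in depth_map
        | some d => pvRunB graph fuel ((name, D, i+1, max best d, g+1) :: rest) memo onp
        | none =>
          if PySem.Set.contains onp child then       -- child on the current path: cycle, 0
            pvRunB graph fuel ((name, D, i+1, best, g+1) :: rest) memo onp
          else
            pvRunB graph fuel ((child, pvDepsB graph child, 0, 0, g) :: (name, D, i+1, best, g+1) :: rest)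
              memo (PySem.Set.add onp child)
    | none =>                                        -- frame done: pop
      let depth : Int := if D = [] then 0 else 1 + best
      pvRunB graph fuel (pvBump rest depth) (memo.insert name depth) (PySem.Set.discard onp name)

def calculate_dependency_depths_py_alt (graph : List (String × List (String × List String))) : (List (String × Int)) × Int :=
  let r := graph.foldl (fun (s : PySem.Dict String Int × PySem.Set String) e =>
      if s.1.contains e.1 then s                     -- if root in depth_map: continue
      else
        pvRunB graph (pvStepBound graph (pvFuel graph - 1))
          [(e.1, pvDepsB graph e.1, 0, 0, pvFuel graph - 1)] s.1 (PySem.Set.add s.2 e.1))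
    (PySem.Dict.mk [], PySem.Set.empty)
  (r.1.items, match r.1.values with                  -- max(depth_map.values(), default=0)
              | [] => 0
              | v :: rest => rest.foldl max v)

-- ===== PRECONDITION & SPEC =====
-- no Pre_: both programs are total and proved equal on every input

def Spec_calculate_dependency_depths_py (graph : List (String × List (String × List String))) (out : (List (String × Int)) × Int) : Prop := out = calculate_dependency_depths_py_alt graph
instance (graph : List (String × List (String × List String))) (out : (List (String × Int)) × Int) : Decidable (Spec_calculate_dependency_depths_py graph out) := by unfold Spec_calculate_dependency_depths_py; infer_instance

-- ===== CLAIM (what is proved, stated in full; the proofs are below) =====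
def Claim_equal_calculate_dependency_depths_py : Prop := ∀ (graph : List (String × List (String × List String))), Dom_calculate_dependency_depths_py graph → Spec_calculate_dependency_depths_py graph (calculate_dependency_depths_py graph)

-- ===== LEMMAS AND PROOFS =====

-- all memo values are nonnegative
def pvMemoNN (m : PySem.Dict String Int) : Prop := ∀ v ∈ m.values, 0 ≤ v
-- max of the memo values, 0 for the empty memo
def pvMaxV (m : PySem.Dict String Int) : Int := m.values.foldl max 0

-- named form of port A's inner fold step (definitionally the port's lambda)
def pvStepA (graph : List (String × List (String × List String))) (fuel : Nat)
    (visited : PySem.Set String) (s : Int × PySem.Dict String Int) (dep : String) :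
    Int × PySem.Dict String Int :=
  let r := pvCalcDepthA graph fuel dep visited s.2
  (max s.1 r.1, r.2)

-- 'pvPB graph f' bounds the machine steps for one CHILD processed at frame fuel f
def pvPB (graph : List (String × List (String × List String))) : Nat → Nat
  | 0 => 0
  | g+1 => pvStepBound graph g

theorem pvStepBound_eq (graph : List (String × List (String × List String))) (f : Nat) :
    pvStepBound graph f = pvFuel graph * (1 + pvPB graph f) + 1 := by
  cases f with
  | zero => simp [pvStepBound, pvPB]
  | succ g => rfl

theorem pvCalcDepthA_succ (graph : List (String × List (String × List String)))
    (fuel : Nat) (name : String) (visited : PySem.Set String) (memo : PySem.Dict String Int) :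
    pvCalcDepthA graph (fuel+1) name visited memo =
      match memo.get? name with
      | some d => (d, memo)
      | none =>
        if PySem.Set.contains visited name then (0, memo)
        else
          match pvDepsA graph name with
          | [] => (0, memo.insert name 0)
          | d0 :: rest =>
            let r0 := pvCalcDepthA graph fuel d0 (PySem.Set.add visited name) memo
            let rf := rest.foldl (pvStepA graph fuel (PySem.Set.add visited name)) (r0.1, r0.2)
            (1 + rf.1, rf.2.insert name (1 + rf.1)) := rfl

theorem pvDepsB_eq_pvDepsA : pvDepsB = pvDepsA := rfl

theorem pv_foldl_max_init_le (l : List Int) (a : Int) : a ≤ l.foldl max a := by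
  induction l generalizing a with
  | nil => exact le_refl a
  | cons x t ih => exact le_trans (le_max_left a x) (ih (max a x))

theorem pv_foldl_max_mem_le (l : List Int) (a v : Int) (hv : v ∈ l) : v ≤ l.foldl max a := by
  induction l generalizing a with
  | nil => cases hv
  | cons x t ih =>
    rcases List.mem_cons.mp hv with h | h
    · subst h; exact le_trans (le_max_right a v) (pv_foldl_max_init_le t _)
    · exact ih _ h

theorem pvMaxV_nonneg (m : PySem.Dict String Int) : 0 ≤ pvMaxV m :=
  pv_foldl_max_init_le m.values 0

theorem pv_mem_values_of_get? (m : PySem.Dict String Int) (k : String) (v : Int)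
    (h : m.get? k = some v) : v ∈ m.values := by
  have hk := PySem.Dict.mem_items_of_get?_eq_some m h
  exact List.mem_map.mpr ⟨(k, v), hk, rfl⟩

theorem pv_values_insert (m : PySem.Dict String Int) (k : String) (v : Int)
    (h : m.contains k = false) : (m.insert k v).values = m.values ++ [v] := by
  simp [PySem.Dict.values, PySem.Dict.items_insert_of_not_contains m v h]

theorem pvMaxV_insert (m : PySem.Dict String Int) (k : String) (v : Int)
    (h : m.contains k = false) : pvMaxV (m.insert k v) = max (pvMaxV m) v := by
  simp [pvMaxV, pv_values_insert m k v h]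

theorem pvMemoNN_insert (m : PySem.Dict String Int) (k : String) (v : Int)
    (h : m.contains k = false) (hm : pvMemoNN m) (hv : 0 ≤ v) :
    pvMemoNN (m.insert k v) := by
  intro w hw
  rw [pv_values_insert m k v h] at hw
  rcases List.mem_append.mp hw with hw | hw
  · exact hm w hw
  · simp at hw; omega

theorem pv_mem_iff (s : PySem.Set String) (x : String) :
    PySem.Set.contains s x = true ↔ x ∈ s := by
  unfold PySem.Set.contains
  rw [List.contains_eq_mem]
  exact decide_eq_true_iff

theorem pv_contains_add_self (s : PySem.Set String) (x : String) :
    PySem.Set.contains (PySem.Set.add s x) x = true := by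
  rw [pv_mem_iff]
  unfold PySem.Set.add
  split
  · next hc => exact (pv_mem_iff s x).mp hc
  · simp

theorem pv_contains_add_mono (s : PySem.Set String) (x k : String)
    (h : PySem.Set.contains s k = true) :
    PySem.Set.contains (PySem.Set.add s x) k = true := by
  rw [pv_mem_iff] at h ⊢
  unfold PySem.Set.add
  split
  · exact h
  · exact List.mem_append_left _ h

theorem pv_discard_add (s : PySem.Set String) (x : String)
    (h : PySem.Set.contains s x = false) :
    PySem.Set.discard (PySem.Set.add s x) x = s := by
  have hx : x ∉ s := by
    intro hm
    rw [(pv_mem_iff s x).mpr hm] at h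
    cases h
  simp only [PySem.Set.add, h, Bool.false_eq_true, if_false]
  simp only [PySem.Set.discard, List.filter_append]
  have h1 : List.filter (fun y => !y == x) [x] = [] := by simp
  have h2 : List.filter (fun y => !y == x) s = s := by
    apply List.filter_eq_self.mpr
    intro y hy
    simp only [Bool.not_eq_eq_eq_not, Bool.not_true, beq_eq_false_iff_ne]
    intro he; exact hx (he ▸ hy)
  rw [h1, h2, List.append_nil]

theorem pv_neq_of_mem_not_mem (visited : PySem.Set String) (k name : String)
    (hk : PySem.Set.contains visited k = true)
    (hn : PySem.Set.contains visited name = false) : (k == name) = false := by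
  by_cases hb : k = name
  · subst hb; rw [hk] at hn; cases hn
  · exact beq_eq_false_iff_ne.mpr hb

-- A-side invariants of the inner fold: nonnegativity, memo nonnegativity, running max of
-- the memo, and preservation of memo membership for on-path names
theorem pvFoldA (graph : List (String × List (String × List String))) (fuel : Nat)
    (IH : ∀ name visited memo, pvMemoNN memo →
      0 ≤ (pvCalcDepthA graph fuel name visited memo).1
      ∧ pvMemoNN (pvCalcDepthA graph fuel name visited memo).2
      ∧ pvMaxV (pvCalcDepthA graph fuel name visited memo).2
          = max (pvMaxV memo) (pvCalcDepthA graph fuel name visited memo).1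
      ∧ ∀ k, PySem.Set.contains visited k = true →
          (pvCalcDepthA graph fuel name visited memo).2.contains k = memo.contains k) :
    ∀ (deps : List String) (visited : PySem.Set String) (a : Int) (memo : PySem.Dict String Int),
      pvMemoNN memo → 0 ≤ a → a ≤ pvMaxV memo →
      a ≤ (deps.foldl (pvStepA graph fuel visited) (a, memo)).1
      ∧ pvMemoNN (deps.foldl (pvStepA graph fuel visited) (a, memo)).2
      ∧ pvMaxV (deps.foldl (pvStepA graph fuel visited) (a, memo)).2
          = max (pvMaxV memo) (deps.foldl (pvStepA graph fuel visited) (a, memo)).1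
      ∧ ∀ k, PySem.Set.contains visited k = true →
          (deps.foldl (pvStepA graph fuel visited) (a, memo)).2.contains k = memo.contains k := by
  intro deps
  induction deps with
  | nil =>
    intro visited a memo hm ha haM
    exact ⟨le_refl a, hm, (max_eq_left haM).symm, fun k _ => rfl⟩
  | cons dep rest ih =>
    intro visited a memo hm ha haM
    obtain ⟨hNN, hMNN, hMax, hPres⟩ := IH dep visited memo hm
    set r := pvCalcDepthA graph fuel dep visited memo with hr
    have hstepA : pvStepA graph fuel visited (a, memo) dep = (max a r.1, r.2) := rfl
    have ha' : 0 ≤ max a r.1 := le_trans ha (le_max_left a r.1)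
    have haM' : max a r.1 ≤ pvMaxV r.2 := by
      rw [hMax]
      exact max_le_max haM (le_refl r.1)
    obtain ⟨c2, c3, c4, c5⟩ := ih visited (max a r.1) r.2 hMNN ha' haM'
    rw [List.foldl_cons, hstepA]
    refine ⟨le_trans (le_max_left a r.1) c2, c3, ?_, ?_⟩
    · rw [c4, hMax, max_assoc,
        max_eq_right (le_trans (le_max_right a r.1) c2)]
    · intro k hk
      rw [c5 k hk, hPres k hk]

theorem pvMainA (graph : List (String × List (String × List String))) :
    ∀ fuel, ∀ name visited memo, pvMemoNN memo →
      0 ≤ (pvCalcDepthA graph fuel name visited memo).1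
      ∧ pvMemoNN (pvCalcDepthA graph fuel name visited memo).2
      ∧ pvMaxV (pvCalcDepthA graph fuel name visited memo).2
          = max (pvMaxV memo) (pvCalcDepthA graph fuel name visited memo).1
      ∧ ∀ k, PySem.Set.contains visited k = true →
          (pvCalcDepthA graph fuel name visited memo).2.contains k = memo.contains k := by
  intro fuel
  induction fuel with
  | zero =>
    intro name visited memo hm
    exact ⟨le_refl 0, hm, (max_eq_left (pvMaxV_nonneg memo)).symm, fun k _ => rfl⟩
  | succ fuel ih =>
    intro name visited memo hm
    rcases h : memo.get? name with _ | d
    · rcases hv : PySem.Set.contains visited name with _ | _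
      · have hmemo : memo.contains name = false :=
          (PySem.Dict.get?_eq_none_iff_contains memo name).mp h
        rcases hd : pvDepsA graph name with _ | ⟨d0, rest⟩
        · have hA : pvCalcDepthA graph (fuel+1) name visited memo = (0, memo.insert name 0) := by
            rw [pvCalcDepthA_succ, h, hv, hd]
            rfl
          refine ⟨by rw [hA], ?_, ?_, ?_⟩
          · rw [hA]; exact pvMemoNN_insert memo name 0 hmemo hm (le_refl 0)
          · rw [hA]; exact pvMaxV_insert memo name 0 hmemo
          · intro k hk
            rw [hA]
            simp only [PySem.Dict.contains_insert]
            rw [pv_neq_of_mem_not_mem visited k name hk hv]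
            simp
        · set visited' := PySem.Set.add visited name with hvis
          obtain ⟨hN0, hM0, hX0, hP0⟩ := ih d0 visited' memo hm
          set r0 := pvCalcDepthA graph fuel d0 visited' memo with hr0
          have hvn' : PySem.Set.contains visited' name = true := pv_contains_add_self visited name
          obtain ⟨c2, c3, c4, c5⟩ :=
            pvFoldA graph fuel ih rest visited' r0.1 r0.2 hM0 hN0 (by rw [hX0]; exact le_max_right _ _)
          set rf := rest.foldl (pvStepA graph fuel visited') (r0.1, r0.2) with hrf
          have hA : pvCalcDepthA graph (fuel+1) name visited memo
              = (1 + rf.1, rf.2.insert name (1 + rf.1)) := by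
            rw [pvCalcDepthA_succ, h, hv, hd]
            rfl
          have hrfc : rf.2.contains name = false := by
            rw [c5 name hvn', hP0 name hvn']
            exact hmemo
          have h0rf : 0 ≤ rf.1 := le_trans hN0 c2
          refine ⟨by rw [hA]; dsimp only; omega, ?_, ?_, ?_⟩
          · rw [hA]
            exact pvMemoNN_insert rf.2 name (1 + rf.1) hrfc c3 (by omega)
          · rw [hA]
            dsimp only
            rw [pvMaxV_insert rf.2 name (1 + rf.1) hrfc, c4, hX0, max_assoc,
              max_eq_right (show rf.1 ≤ 1 + rf.1 by omega), max_assoc,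
              max_eq_right (show r0.1 ≤ 1 + rf.1 by omega)]
          · intro k hk
            have hk' : PySem.Set.contains visited' k = true := pv_contains_add_mono visited name k hk
            rw [hA]
            simp only [PySem.Dict.contains_insert]
            rw [pv_neq_of_mem_not_mem visited k name hk hv]
            simp only [Bool.false_or]
            rw [c5 k hk', hP0 k hk']
      · have hA : pvCalcDepthA graph (fuel+1) name visited memo = (0, memo) := by
          rw [pvCalcDepthA_succ, h, hv]
          rfl
        refine ⟨by rw [hA], ?_, ?_, ?_⟩
        · rw [hA]; exact hm
        · rw [hA]; exact (max_eq_left (pvMaxV_nonneg memo)).symm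
        · intro k _; rw [hA]
    · have hd : d ∈ memo.values := pv_mem_values_of_get? memo name d h
      have hA : pvCalcDepthA graph (fuel+1) name visited memo = (d, memo) := by
        rw [pvCalcDepthA_succ, h]
      refine ⟨?_, ?_, ?_, ?_⟩
      · rw [hA]; exact hm d hd
      · rw [hA]; exact hm
      · rw [hA]; exact (max_eq_left (pv_foldl_max_mem_le memo.values 0 d hd)).symm
      · intro k _; rw [hA]

-- dependency lists are bounded by pvFuel
theorem pv_get?_mk_mem {ν : Type} (l : List (String × ν)) (k : String) (v : ν)
    (h : (PySem.Dict.mk l).get? k = some v) : (k, v) ∈ l := by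
  induction l with
  | nil => exact absurd h (by rw [show (PySem.Dict.mk ([] : List (String × ν))).get? k = none from rfl]; simp)
  | cons p t ih =>
    rw [PySem.Dict.get?_mk_cons] at h
    by_cases hk : (p.1 == k) = true
    · rw [if_pos hk] at h
      have hpk : p.1 = k := eq_of_beq hk
      have hv : p.2 = v := by injection h
      have hkv : (k, v) = p := by rw [← hpk, ← hv]
      rw [hkv]
      exact List.mem_cons_self
    · rw [if_neg hk] at h
      right
      exact ih h

theorem pvDepsLen (graph : List (String × List (String × List String))) (name : String) :
    (pvDepsB graph name).length ≤ pvFuel graph := by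
  unfold pvDepsB
  rcases h1 : (PySem.Dict.mk graph).get? name with _ | inner
  · rw [PySem.Dict.getD_of_get?_eq_none _ _ h1]
    rw [PySem.Dict.getD_eq_get?_getD,
      show (PySem.Dict.mk ([] : List (String × List String))).get? "dependencies" = none from rfl]
    simp [pvFuel]
  · rw [PySem.Dict.getD_of_get?_eq_some _ _ h1]
    rcases h2 : (PySem.Dict.mk inner).get? "dependencies" with _ | D
    · rw [PySem.Dict.getD_of_get?_eq_none _ _ h2]
      simp [pvFuel]
    · rw [PySem.Dict.getD_of_get?_eq_some _ _ h2]
      have hm1 : (name, inner) ∈ graph := pv_get?_mk_mem graph name inner h1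
      have hm2 : ("dependencies", D) ∈ inner := pv_get?_mk_mem inner "dependencies" D h2
      have hb1 : D.length ≤ (inner.map (fun p => p.2.length)).sum := by
        exact List.single_le_sum (fun x _ => Nat.zero_le x) _
          (List.mem_map.mpr ⟨("dependencies", D), hm2, rfl⟩)
      have hb2 : (inner.map (fun p => p.2.length)).sum
          ≤ (graph.map (fun e => (e.2.map (fun p => p.2.length)).sum)).sum := by
        exact List.single_le_sum (fun x _ => Nat.zero_le x) _
          (List.mem_map.mpr ⟨(name, inner), hm1, rfl⟩)
      unfold pvFuel
      omega

-- machine step equations (the while-loop body, one case each)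
theorem pvRunB_nil (graph : List (String × List (String × List String))) (fuel : Nat)
    (memo : PySem.Dict String Int) (onp : PySem.Set String) :
    pvRunB graph fuel [] memo onp = (memo, onp) := by cases fuel <;> rfl

theorem pvRunB_step_f0 (graph : List (String × List (String × List String)))
    (fuel : Nat) (name : String) (D : List String) (i : Nat) (best : Int)
    (rest : List (String × List String × Nat × Int × Nat))
    (memo : PySem.Dict String Int) (onp : PySem.Set String) (child : String)
    (hD : D[i]? = some child) :
    pvRunB graph (fuel+1) ((name,D,i,best,0)::rest) memo onp
      = pvRunB graph fuel ((name,D,i+1,best,0)::rest) memo onp := by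
  simp only [pvRunB, hD]

theorem pvRunB_step_pop (graph : List (String × List (String × List String)))
    (fuel : Nat) (name : String) (D : List String) (i : Nat) (best : Int) (f : Nat)
    (rest : List (String × List String × Nat × Int × Nat))
    (memo : PySem.Dict String Int) (onp : PySem.Set String)
    (hD : D[i]? = none) :
    pvRunB graph (fuel+1) ((name,D,i,best,f)::rest) memo onp
      = pvRunB graph fuel (pvBump rest (if D = [] then 0 else 1+best))
          (memo.insert name (if D = [] then 0 else 1+best)) (PySem.Set.discard onp name) := by
  simp only [pvRunB, hD]

theorem pvRunB_step_memo (graph : List (String × List (String × List String)))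
    (fuel : Nat) (name : String) (D : List String) (i : Nat) (best : Int) (g : Nat)
    (rest : List (String × List String × Nat × Int × Nat))
    (memo : PySem.Dict String Int) (onp : PySem.Set String) (child : String) (d : Int)
    (hD : D[i]? = some child) (hm : memo.get? child = some d) :
    pvRunB graph (fuel+1) ((name,D,i,best,g+1)::rest) memo onp
      = pvRunB graph fuel ((name,D,i+1,max best d,g+1)::rest) memo onp := by
  simp only [pvRunB, hD, hm]

theorem pvRunB_step_cyc (graph : List (String × List (String × List String)))
    (fuel : Nat) (name : String) (D : List String) (i : Nat) (best : Int) (g : Nat)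
    (rest : List (String × List String × Nat × Int × Nat))
    (memo : PySem.Dict String Int) (onp : PySem.Set String) (child : String)
    (hD : D[i]? = some child) (hm : memo.get? child = none)
    (ho : PySem.Set.contains onp child = true) :
    pvRunB graph (fuel+1) ((name,D,i,best,g+1)::rest) memo onp
      = pvRunB graph fuel ((name,D,i+1,best,g+1)::rest) memo onp := by
  simp only [pvRunB, hD, hm, ho]
  simp

theorem pvRunB_step_push (graph : List (String × List (String × List String)))
    (fuel : Nat) (name : String) (D : List String) (i : Nat) (best : Int) (g : Nat)
    (rest : List (String × List String × Nat × Int × Nat))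
    (memo : PySem.Dict String Int) (onp : PySem.Set String) (child : String)
    (hD : D[i]? = some child) (hm : memo.get? child = none)
    (ho : PySem.Set.contains onp child = false) :
    pvRunB graph (fuel+1) ((name,D,i,best,g+1)::rest) memo onp
      = pvRunB graph fuel ((child, pvDepsB graph child, 0, 0, g) :: (name,D,i+1,best,g+1)::rest)
          memo (PySem.Set.add onp child) := by
  simp only [pvRunB, hD, hm, ho]
  simp

-- the three simulation properties, one per frame fuel f:
-- pvCSTP: one child of the top frame is consumed exactly as port A's fold step would
def pvCSTP (graph : List (String × List (String × List String))) (f : Nat) : Prop :=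
  ∀ (name : String) (D : List String) (i : Nat) (best : Int)
    (rest : List (String × List String × Nat × Int × Nat))
    (memo : PySem.Dict String Int) (onp : PySem.Set String) (child : String),
    D[i]? = some child → 0 ≤ best → pvMemoNN memo →
    ∃ k, k ≤ 1 + pvPB graph f ∧ ∀ fuel,
      pvRunB graph (k + fuel) ((name, D, i, best, f) :: rest) memo onp
        = pvRunB graph fuel
            ((name, D, i+1, max best (pvCalcDepthA graph f child onp memo).1, f) :: rest)
            (pvCalcDepthA graph f child onp memo).2 onp

-- pvLInP: the top frame is finished: remaining deps folded as port A folds them, the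
-- result memoized, the on-path set backtracked, the parent frame bumped
def pvLInP (graph : List (String × List (String × List String))) (f : Nat) : Prop :=
  ∀ (n i : Nat) (best : Int) (rest : List (String × List String × Nat × Int × Nat))
    (memo : PySem.Dict String Int) (onp : PySem.Set String) (name : String),
    i + n = (pvDepsB graph name).length →
    memo.get? name = none → PySem.Set.contains onp name = true → 0 ≤ best → pvMemoNN memo →
    ∃ k, k ≤ n * (1 + pvPB graph f) + 1 ∧ ∀ fuel,
      pvRunB graph (k + fuel) ((name, pvDepsB graph name, i, best, f) :: rest) memo onp
        = pvRunB graph fuel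
            (pvBump rest (if pvDepsB graph name = [] then (0:Int)
              else 1 + (((pvDepsB graph name).drop i).foldl (pvStepA graph f onp) (best, memo)).1))
            ((((pvDepsB graph name).drop i).foldl (pvStepA graph f onp) (best, memo)).2.insert name
              (if pvDepsB graph name = [] then (0:Int)
               else 1 + (((pvDepsB graph name).drop i).foldl (pvStepA graph f onp) (best, memo)).1))
            (PySem.Set.discard onp name)

-- pvNodeP: a freshly pushed node's whole subtree equals port A's recursive call on it
def pvNodeP (graph : List (String × List (String × List String))) (f : Nat) : Prop :=
  ∀ (node : String) (rest : List (String × List String × Nat × Int × Nat))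
    (memo : PySem.Dict String Int) (onp : PySem.Set String),
    memo.get? node = none → PySem.Set.contains onp node = false → pvMemoNN memo →
    ∃ k, k ≤ pvStepBound graph f ∧ ∀ fuel,
      pvRunB graph (k + fuel) ((node, pvDepsB graph node, 0, 0, f) :: rest) memo (PySem.Set.add onp node)
        = pvRunB graph fuel (pvBump rest (pvCalcDepthA graph (f+1) node onp memo).1)
            (pvCalcDepthA graph (f+1) node onp memo).2 onp

-- port A's recursive call on a fresh node, written as the fold the machine performs
theorem pvCalcNode (graph : List (String × List (String × List String))) (f : Nat)
    (node : String) (memo : PySem.Dict String Int) (onp : PySem.Set String)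
    (hm : memo.get? node = none) (ho : PySem.Set.contains onp node = false)
    (hNN : pvMemoNN memo) :
    pvCalcDepthA graph (f+1) node onp memo
      = ((if pvDepsA graph node = [] then (0:Int)
          else 1 + ((pvDepsA graph node).foldl (pvStepA graph f (PySem.Set.add onp node)) (0, memo)).1),
         ((pvDepsA graph node).foldl (pvStepA graph f (PySem.Set.add onp node)) (0, memo)).2.insert node
           (if pvDepsA graph node = [] then (0:Int)
            else 1 + ((pvDepsA graph node).foldl (pvStepA graph f (PySem.Set.add onp node)) (0, memo)).1)) := by
  rw [pvCalcDepthA_succ, hm, ho]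
  rcases hd : pvDepsA graph node with _ | ⟨d0, restD⟩
  · simp
  · have h0 : 0 ≤ (pvCalcDepthA graph f d0 (PySem.Set.add onp node) memo).1 :=
      (pvMainA graph f d0 (PySem.Set.add onp node) memo hNN).1
    have hstep : pvStepA graph f (PySem.Set.add onp node) (0, memo) d0
        = ((pvCalcDepthA graph f d0 (PySem.Set.add onp node) memo).1,
           (pvCalcDepthA graph f d0 (PySem.Set.add onp node) memo).2) := by
      simp only [pvStepA]
      rw [max_eq_right h0]
    simp only [List.foldl_cons, hstep, reduceCtorEq]
    rfl

theorem pvNodeAux (graph : List (String × List (String × List String))) (f : Nat)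
    (hL : pvLInP graph f) : pvNodeP graph f := by
  intro node rest memo onp hm ho hNN
  obtain ⟨k, hk, hrun⟩ := hL (pvDepsB graph node).length 0 0 rest memo (PySem.Set.add onp node) node
    (by omega) hm (pv_contains_add_self onp node) (le_refl 0) hNN
  refine ⟨k, ?_, ?_⟩
  · calc k ≤ (pvDepsB graph node).length * (1 + pvPB graph f) + 1 := hk
      _ ≤ pvFuel graph * (1 + pvPB graph f) + 1 :=
          by have := pvDepsLen graph node; exact Nat.add_le_add_right (Nat.mul_le_mul_right _ this) 1
      _ = pvStepBound graph f := (pvStepBound_eq graph f).symm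
  · intro fuel
    rw [hrun fuel]
    rw [pvCalcNode graph f node memo onp hm ho hNN]
    rw [pv_discard_add onp node ho]
    simp only [List.drop_zero, pvDepsB_eq_pvDepsA]

theorem pvLInner (graph : List (String × List (String × List String))) (f : Nat)
    (hC : pvCSTP graph f) : pvLInP graph f := by
  intro n
  induction n with
  | zero =>
    intro i best rest memo onp name hlen hm ho hb hNN
    refine ⟨1, by omega, ?_⟩
    intro fuel
    have hD : (pvDepsB graph name)[i]? = none := by
      apply List.getElem?_eq_none
      omega
    rw [Nat.add_comm 1 fuel, pvRunB_step_pop graph fuel name _ i best f rest memo onp hD]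
    have hdrop : (pvDepsB graph name).drop i = [] := List.drop_eq_nil_of_le (by omega)
    rw [hdrop]
    simp only [List.foldl_nil]
  | succ n ih =>
    intro i best rest memo onp name hlen hm ho hb hNN
    have hi : i < (pvDepsB graph name).length := by omega
    have hD : (pvDepsB graph name)[i]? = some ((pvDepsB graph name)[i]) :=
      List.getElem?_eq_getElem hi
    obtain ⟨k1, hk1, hrun1⟩ := hC name (pvDepsB graph name) i best rest memo onp _ hD hb hNN
    set child := (pvDepsB graph name)[i] with hchild
    set r := pvCalcDepthA graph f child onp memo with hr
    obtain ⟨hr1, hr2, _, hr4⟩ := pvMainA graph f child onp memo hNN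
    rw [← hr] at hr1 hr2 hr4
    have hm' : r.2.get? name = none := by
      rw [PySem.Dict.get?_eq_none_iff_contains]
      rw [hr4 name ho]
      exact (PySem.Dict.get?_eq_none_iff_contains memo name).mp hm
    obtain ⟨k2, hk2, hrun2⟩ := ih (i+1) (max best r.1) rest r.2 onp name (by omega) hm' ho
      (le_trans hb (le_max_left best r.1)) hr2
    refine ⟨k1 + k2, by nlinarith [hk1, hk2], ?_⟩
    intro fuel
    have harith : k1 + k2 + fuel = k1 + (k2 + fuel) := by omega
    rw [harith, hrun1 (k2 + fuel)]
    have hdrop : (pvDepsB graph name).drop i = child :: (pvDepsB graph name).drop (i+1) :=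
      List.drop_eq_getElem_cons hi
    rw [hdrop]
    simp only [List.foldl_cons]
    have hstep : pvStepA graph f onp (best, memo) child = (max best r.1, r.2) := rfl
    rw [hstep]
    exact hrun2 fuel

theorem pvCST0 (graph : List (String × List (String × List String))) : pvCSTP graph 0 := by
  intro name D i best rest memo onp child hD hb hNN
  refine ⟨1, by simp [pvPB], ?_⟩
  intro fuel
  rw [Nat.add_comm 1 fuel, pvRunB_step_f0 graph fuel name D i best rest memo onp child hD]
  have hA : pvCalcDepthA graph 0 child onp memo = (0, memo) := rfl
  rw [hA]
  rw [max_eq_left hb]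

theorem pvCSTsucc (graph : List (String × List (String × List String))) (g : Nat)
    (hN : pvNodeP graph g) : pvCSTP graph (g+1) := by
  intro name D i best rest memo onp child hD hb hNN
  rcases hmc : memo.get? child with _ | d
  · rcases hoc : PySem.Set.contains onp child with _ | _
    · -- fresh child: push, run its whole subtree, bump the parent
      obtain ⟨k, hk, hrun⟩ := hN child ((name, D, i+1, best, g+1) :: rest) memo onp hmc hoc hNN
      refine ⟨1 + k, ?_, ?_⟩
      · simp only [pvPB]
        omega
      · intro fuel
        have harith : 1 + k + fuel = (k + fuel) + 1 := by omega
        rw [harith, pvRunB_step_push graph (k + fuel) name D i best g rest memo onp child hD hmc hoc]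
        rw [hrun fuel]
        rfl
    · -- child on the current path: contributes 0
      refine ⟨1, by omega, ?_⟩
      intro fuel
      rw [Nat.add_comm 1 fuel, pvRunB_step_cyc graph fuel name D i best g rest memo onp child hD hmc hoc]
      have hA : pvCalcDepthA graph (g+1) child onp memo = (0, memo) := by
        rw [pvCalcDepthA_succ, hmc, hoc]
        simp
      rw [hA, max_eq_left hb]
  · -- memoized child
    refine ⟨1, by omega, ?_⟩
    intro fuel
    rw [Nat.add_comm 1 fuel, pvRunB_step_memo graph fuel name D i best g rest memo onp child d hD hmc]
    have hA : pvCalcDepthA graph (g+1) child onp memo = (d, memo) := by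
      rw [pvCalcDepthA_succ, hmc]
    rw [hA]

theorem pvNode (graph : List (String × List (String × List String))) :
    ∀ f, pvNodeP graph f := by
  intro f
  induction f with
  | zero => exact pvNodeAux graph 0 (pvLInner graph 0 (pvCST0 graph))
  | succ g ih => exact pvNodeAux graph (g+1) (pvLInner graph (g+1) (pvCSTsucc graph g ih))

theorem pv_contains_empty (x : String) : PySem.Set.contains PySem.Set.empty x = false := rfl

-- the two top-level loops over graph.keys, related entry by entry
theorem pvTopB (graph : List (String × List (String × List String))) :
    ∀ (l : List (String × List (String × List String))) (memo : PySem.Dict String Int) (mx : Int),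
      pvMemoNN memo → mx = pvMaxV memo →
      (l.foldl (fun (s : PySem.Dict String Int × PySem.Set String) e =>
          if s.1.contains e.1 then s
          else
            pvRunB graph (pvStepBound graph (pvFuel graph - 1))
              [(e.1, pvDepsB graph e.1, 0, 0, pvFuel graph - 1)] s.1 (PySem.Set.add s.2 e.1))
        (memo, PySem.Set.empty)
        = ((l.foldl (fun (s : PySem.Dict String Int × Int) e =>
              let c := pvCalcDepthA graph (pvFuel graph) e.1 PySem.Set.empty s.1
              (c.2, max s.2 c.1)) (memo, mx)).1, PySem.Set.empty))
      ∧ pvMemoNN (l.foldl (fun (s : PySem.Dict String Int × Int) e =>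
              let c := pvCalcDepthA graph (pvFuel graph) e.1 PySem.Set.empty s.1
              (c.2, max s.2 c.1)) (memo, mx)).1
      ∧ (l.foldl (fun (s : PySem.Dict String Int × Int) e =>
              let c := pvCalcDepthA graph (pvFuel graph) e.1 PySem.Set.empty s.1
              (c.2, max s.2 c.1)) (memo, mx)).2
          = pvMaxV (l.foldl (fun (s : PySem.Dict String Int × Int) e =>
              let c := pvCalcDepthA graph (pvFuel graph) e.1 PySem.Set.empty s.1
              (c.2, max s.2 c.1)) (memo, mx)).1 := by
  have hF : pvFuel graph = (pvFuel graph - 1) + 1 := by unfold pvFuel; omega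
  intro l
  induction l with
  | nil =>
    intro memo mx hm hmx
    exact ⟨rfl, hm, hmx⟩
  | cons e t ih =>
    intro memo mx hm hmx
    rcases hc : memo.contains e.1 with _ | _
    · -- fresh root: one full machine run equals port A's recursive call
      have hg : memo.get? e.1 = none := (PySem.Dict.get?_eq_none_iff_contains memo e.1).mpr hc
      obtain ⟨k, hk, hrun⟩ := pvNode graph (pvFuel graph - 1) e.1 [] memo PySem.Set.empty hg
        (pv_contains_empty e.1) hm
      set c := pvCalcDepthA graph (pvFuel graph) e.1 PySem.Set.empty memo with hcdef
      have hB1 : pvRunB graph (pvStepBound graph (pvFuel graph - 1))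
          [(e.1, pvDepsB graph e.1, 0, 0, pvFuel graph - 1)] memo (PySem.Set.add PySem.Set.empty e.1)
          = (c.2, PySem.Set.empty) := by
        have hsb : pvStepBound graph (pvFuel graph - 1) = k + (pvStepBound graph (pvFuel graph - 1) - k) := by omega
        rw [hsb, hrun _]
        rw [show pvCalcDepthA graph ((pvFuel graph - 1) + 1) e.1 PySem.Set.empty memo = c from by rw [hcdef, ← hF]]
        simp only [pvBump]
        exact pvRunB_nil graph _ c.2 PySem.Set.empty
      obtain ⟨hc1, hc2, hc3, _⟩ := pvMainA graph (pvFuel graph) e.1 PySem.Set.empty memo hm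
      simp only [List.foldl_cons, hc, Bool.false_eq_true, if_false, hB1]
      exact ih c.2 (max mx c.1) hc2 (by rw [hc3, ← hmx, hcdef])
    · -- root already memoized: the machine skips, port A returns the memo value
      obtain ⟨d, hd⟩ : ∃ d, memo.get? e.1 = some d := by
        have := PySem.Dict.contains_eq_isSome_get? memo e.1
        rw [hc] at this
        rcases hx : memo.get? e.1 with _ | d
        · rw [hx] at this; simp at this
        · exact ⟨d, rfl⟩
      have hA : pvCalcDepthA graph (pvFuel graph) e.1 PySem.Set.empty memo = (d, memo) := by
        rw [hF, pvCalcDepthA_succ, hd]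
      have hdm : d ∈ memo.values := pv_mem_values_of_get? memo e.1 d hd
      have hmax : max mx d = pvMaxV memo := by
        rw [hmx]
        exact max_eq_left (pv_foldl_max_mem_le memo.values 0 d hdm)
      simp only [List.foldl_cons, hc, if_true, hA]
      exact ih memo (max mx d) hm hmax

theorem pv_match_max (m : PySem.Dict String Int) (hm : pvMemoNN m) :
    (match m.values with
     | [] => (0 : Int)
     | v :: rest => rest.foldl max v) = pvMaxV m := by
  rcases hv : m.values with _ | ⟨v, rest⟩
  · simp [pvMaxV, hv]
  · have h0 : 0 ≤ v := hm v (by rw [hv]; exact List.mem_cons_self)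
    simp only [pvMaxV, hv, List.foldl_cons]
    rw [max_eq_right h0]

-- ===== VERDICT (by name: the statement is the Claim_ definition above) =====
theorem calculate_dependency_depths_py_spec : Claim_equal_calculate_dependency_depths_py := by
  intro graph _
  unfold Spec_calculate_dependency_depths_py
  unfold calculate_dependency_depths_py calculate_dependency_depths_py_alt
  simp only []
  have hm0 : pvMemoNN (PySem.Dict.mk ([] : List (String × Int))) := by
    intro v hv; simp [PySem.Dict.values] at hv
  obtain ⟨hB, hNN, hMax⟩ := pvTopB graph graph (PySem.Dict.mk []) 0 hm0 rfl
  rw [hB]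
  simp only []
  rw [pv_match_max _ hNN, ← hMax]
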